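-- pv_equiv track=rewrite | github.com/minnseong/Algorithm | programmers/Kakao/CandidateKey.py | combine_keys
-- ===== SOURCE A (Python) =====
-- def combine_keys(keys, index):
--     combine_keys_list = []
--
--     for i in range(len(keys[0])):
--         combine_key = ""
--         for j in range(len(index)):
--             combine_key += keys[index[j]][i]
--         combine_keys_list.append(combine_key)
--     return combine_keys_list
-- ===== SOURCE B (Python) =====
-- def combine_keys(keys, index):
--     result = [''] * len(keys[0])
--     for j in index:
--         for i in range(len(result)):
--             result[i] += keys[j][i]
--     return result
-- ===== Notes on version B (the rewrite author's own statement) =====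
-- stated objective: alternative
-- what changed: B swaps the nesting: it threads a list of partial strings (one per column) across the selected rows, appending each row's fragments in one inner sweep, instead of building each output string to completion with an inner scan over the selected rows.
import Mathlib
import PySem

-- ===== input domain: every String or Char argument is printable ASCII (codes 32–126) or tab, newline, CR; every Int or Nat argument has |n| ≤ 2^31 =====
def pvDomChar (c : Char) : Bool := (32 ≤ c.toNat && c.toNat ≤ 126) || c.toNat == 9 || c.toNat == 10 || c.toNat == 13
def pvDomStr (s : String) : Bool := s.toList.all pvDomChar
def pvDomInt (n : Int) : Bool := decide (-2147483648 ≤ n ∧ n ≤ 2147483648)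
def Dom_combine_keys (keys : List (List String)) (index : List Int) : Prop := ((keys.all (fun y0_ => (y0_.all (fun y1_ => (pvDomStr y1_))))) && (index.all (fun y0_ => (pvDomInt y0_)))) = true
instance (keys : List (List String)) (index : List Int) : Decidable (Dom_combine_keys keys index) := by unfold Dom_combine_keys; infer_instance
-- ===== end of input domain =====

-- B threads a list of partial strings across the selected rows (outer loop over index)
-- instead of building each output string to completion (outer loop over columns): an
-- alternative decomposition of the same O(cols*rows) work.


-- ===== PORT A =====
def combine_keys (keys : List (List String)) (index : List Int) : List String :=
  (PySem.List.pyRange 0 ((PySem.List.pyGetD keys 0 []).length : Int) 1).foldl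
    (fun acc i =>
      acc ++ [ (PySem.List.pyRange 0 (index.length : Int) 1).foldl
                 (fun ck j =>
                   ck ++ PySem.List.pyGetD (PySem.List.pyGetD keys (PySem.List.pyGetD index j 0) []) i "")
                 "" ])
    []

-- ===== PORT B =====
def combine_keys_alt (keys : List (List String)) (index : List Int) : List String :=
  index.foldl
    (fun res j =>
      (PySem.List.pyRange 0 (res.length : Int) 1).foldl
        (fun r i =>
          r.set i.toNat
            (PySem.List.pyGetD r i "" ++
              PySem.List.pyGetD (PySem.List.pyGetD keys j []) i ""))
        res)
    (List.replicate (PySem.List.pyGetD keys 0 []).length "")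

-- ===== PRECONDITION & SPEC =====
-- Pre_ is exactly where Python's A returns: keys nonempty (keys[0]), and — unless row 0 is
-- empty, in which case the loops never touch index — every selected index valid with a row
-- at least as long as row 0 (else keys[index[j]][i] raises IndexError).
def Pre_combine_keys (keys : List (List String)) (index : List Int) : Prop :=
  keys ≠ [] ∧ (PySem.List.pyGetD keys 0 [] = [] ∨ ∀ j ∈ index, PySem.Raise.InRange keys.length j ∧
    (PySem.List.pyGetD keys 0 []).length ≤ (PySem.List.pyGetD keys j []).length)
instance (keys : List (List String)) (index : List Int) : Decidable (Pre_combine_keys keys index) := by unfold Pre_combine_keys; infer_instance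
def pvWitness_combine_keys : List (List String) × List Int := ([["a","b"],["c","d"]], [1, 0])
def Spec_combine_keys (keys : List (List String)) (index : List Int) (out : List String) : Prop := out = combine_keys_alt keys index
instance (keys : List (List String)) (index : List Int) (out : List String) : Decidable (Spec_combine_keys keys index out) := by unfold Spec_combine_keys; infer_instance

-- ===== CLAIM (what is proved, stated in full; the proofs are below) =====
def Claim_equal_combine_keys : Prop := ∀ (keys : List (List String)) (index : List Int), Dom_combine_keys keys index → Pre_combine_keys keys index → Spec_combine_keys keys index (combine_keys keys index)

-- ===== LEMMAS AND PROOFS =====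

-- A's port in closed form: one output string per column, each a fold over the selected rows.
theorem combineA_closed (keys : List (List String)) (index : List Int) :
    combine_keys keys index =
      (List.range (PySem.List.pyGetD keys 0 []).length).map
        (fun (k : Nat) => index.foldl
          (fun ck j => ck ++ PySem.List.pyGetD (PySem.List.pyGetD keys j []) ((k : Nat) : Int) "") "") := by
  unfold combine_keys
  rw [PySem.List.foldl_append_singleton_eq_map, List.nil_append]
  conv_lhs => rw [PySem.List.pyRange_zero_nat (PySem.List.pyGetD keys 0 []).length]
  rw [List.map_map]
  refine List.map_congr_left (fun k _ => ?_)
  simp only [Function.comp_apply]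
  exact PySem.List.foldl_pyRange_zero_pyGetD' index 0
    (fun ck v => ck ++ PySem.List.pyGetD (PySem.List.pyGetD keys v []) ((k : Nat) : Int) "") ""

-- One inner sweep of B: with i running over all positions of r, the in-place updates
-- amount to appending g i at every position.
theorem sweep_eq_mapIdx (g : Int → String) (r : List String) :
    (PySem.List.pyRange 0 (r.length : Int) 1).foldl
        (fun r i => r.set i.toNat (PySem.List.pyGetD r i "" ++ g i)) r
      = r.mapIdx (fun i s => s ++ g (i : Int)) := by
  suffices h : ∀ (m : Nat) (r : List String), m ≤ r.length →
      (PySem.List.pyRange 0 (m : Int) 1).foldl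
          (fun r i => r.set i.toNat (PySem.List.pyGetD r i "" ++ g i)) r
        = r.mapIdx (fun i s => if i < m then s ++ g (i : Int) else s) by
    rw [h r.length r le_rfl]
    refine List.ext_getElem (by simp) (fun k h1 h2 => ?_)
    simp only [List.getElem_mapIdx]
    rw [if_pos (by simpa using h1)]
  intro m
  induction m with
  | zero =>
    intro r _
    rw [show ((0 : Nat) : Int) = 0 by simp, PySem.List.pyRange_one_eq_nil le_rfl]
    simp only [List.foldl_nil]
    refine (List.ext_getElem (by simp) (fun k h1 h2 => ?_)).symm
    simp [List.getElem_mapIdx]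
  | succ m ih =>
    intro r hm
    have hcast : ((m + 1 : Nat) : Int) = (m : Int) + 1 := by push_cast; ring
    rw [hcast, PySem.List.pyRange_one_succ_right (by omega), List.foldl_append,
      ih r (by omega)]
    simp only [List.foldl_cons, List.foldl_nil]
    refine List.ext_getElem (by simp) (fun k h1 h2 => ?_)
    have hk2 : k < r.length := by simpa using h2
    rw [List.getElem_set]
    simp only [Int.toNat_natCast]
    by_cases hk : m = k
    · subst hk
      have hget : PySem.List.pyGetD (r.mapIdx (fun i s => if i < m then s ++ g (i : Int) else s)) (m : Int) ""
          = r[m]'(by omega) := by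
        rw [PySem.List.pyGetD_eq_getElem _ "" (by omega) (by simp; omega)]
        simp [List.getElem_mapIdx]
      rw [if_pos rfl, hget, List.getElem_mapIdx, if_pos (Nat.lt_succ_self m)]
    · rw [if_neg hk, List.getElem_mapIdx, List.getElem_mapIdx]
      split_ifs with h1' h2' <;> first | rfl | omega

-- B's outer fold, each sweep rewritten as a mapIdx over the accumulator.
theorem combineB_fold (keys : List (List String)) (index : List Int) (start : List String) :
    index.foldl
        (fun res j =>
          (PySem.List.pyRange 0 (res.length : Int) 1).foldl
            (fun r i => r.set i.toNat (PySem.List.pyGetD r i "" ++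
                PySem.List.pyGetD (PySem.List.pyGetD keys j []) i "")) res)
        start
      = start.mapIdx (fun k s =>
          index.foldl (fun ck j => ck ++ PySem.List.pyGetD (PySem.List.pyGetD keys j []) (k : Int) "") s) := by
  induction index generalizing start with
  | nil =>
    refine (List.ext_getElem (by simp) (fun k h1 h2 => ?_)).symm
    simp [List.getElem_mapIdx]
  | cons j idx ih =>
    rw [List.foldl_cons, sweep_eq_mapIdx, ih, List.mapIdx_mapIdx]
    rfl

-- ===== VERDICT (by name: the statement is the Claim_ definition above) =====
theorem combine_keys_spec : Claim_equal_combine_keys := by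
  intro keys index _ _
  unfold Spec_combine_keys combine_keys_alt
  rw [combineA_closed, combineB_fold]
  refine List.ext_getElem (by simp) (fun k h1 h2 => ?_)
  simp only [List.getElem_map, List.getElem_range, List.getElem_mapIdx, List.getElem_replicate]
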